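-- pv_equiv track=rewrite | github.com/livestreamx/graph-ui-convertor | domain/services/block_graph_resolution.py | _select_procedure_pairs
-- ===== SOURCE A (Python) =====
-- from collections.abc import Iterable, Mapping, Sequence
--
-- def _select_procedure_pairs(
--     source_candidates: set[str],
--     target_candidates: set[str],
--     adjacency: Mapping[str, set[str]],
-- ) -> list[tuple[str, str]]:
--     if len(source_candidates) == 1 and len(target_candidates) == 1:
--         return [(next(iter(source_candidates)), next(iter(target_candidates)))]
--
--     pairs = [
--         (source_proc, target_proc)
--         for source_proc in sorted(source_candidates)
--         for target_proc in sorted(target_candidates)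
--     ]
--     if not pairs:
--         return []
--
--     direct = [pair for pair in pairs if pair[1] in adjacency.get(pair[0], set())]
--     if direct:
--         return direct
--
--     # If block ids are reused across procedures, preserve per-procedure local edges.
--     local = [(proc_id, proc_id) for proc_id in sorted(source_candidates & target_candidates)]
--     if local:
--         return local
--
--     reverse = [pair for pair in pairs if pair[0] in adjacency.get(pair[1], set())]
--     if reverse:
--         return reverse
--
--     return []
-- ===== SOURCE B (Python) =====
-- def _select_procedure_pairs(source_candidates, target_candidates, adjacency):
--     if len(source_candidates) == 1 and len(target_candidates) == 1:
--         return [(next(iter(source_candidates)), next(iter(target_candidates)))]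
--
--     ss = sorted(source_candidates)
--     ts = sorted(target_candidates)
--     sset = set(source_candidates)
--     tset = set(target_candidates)
--
--     # Direct: per source, walk only its (sorted) adjacency set instead of all targets.
--     direct = [
--         (s, t)
--         for s in ss
--         for t in sorted(adjacency.get(s, ()))
--         if t in tset
--     ]
--     if direct:
--         return direct
--
--     # Local: sorted sources that are also targets.
--     local = [(p, p) for p in ss if p in tset]
--     if local:
--         return local
--
--     # Reverse: index targets by their adjacent sources once, then read off per source.
--     rmap = {}
--     for t in ts:
--         for s in adjacency.get(t, ()):
--             if s in sset:
--                 rmap.setdefault(s, []).append(t)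
--     return [(s, t) for s in ss for t in rmap.get(s, [])]
-- ===== Notes on version B (the rewrite author's own statement) =====
-- stated objective: faster
-- what changed: B drops the full sorted source-by-target product: the direct phase walks only each source's own (sorted) adjacency set, the local phase filters the sorted sources, and the reverse phase builds a per-source index of targets once instead of re-scanning all targets per pair.
import Mathlib
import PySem

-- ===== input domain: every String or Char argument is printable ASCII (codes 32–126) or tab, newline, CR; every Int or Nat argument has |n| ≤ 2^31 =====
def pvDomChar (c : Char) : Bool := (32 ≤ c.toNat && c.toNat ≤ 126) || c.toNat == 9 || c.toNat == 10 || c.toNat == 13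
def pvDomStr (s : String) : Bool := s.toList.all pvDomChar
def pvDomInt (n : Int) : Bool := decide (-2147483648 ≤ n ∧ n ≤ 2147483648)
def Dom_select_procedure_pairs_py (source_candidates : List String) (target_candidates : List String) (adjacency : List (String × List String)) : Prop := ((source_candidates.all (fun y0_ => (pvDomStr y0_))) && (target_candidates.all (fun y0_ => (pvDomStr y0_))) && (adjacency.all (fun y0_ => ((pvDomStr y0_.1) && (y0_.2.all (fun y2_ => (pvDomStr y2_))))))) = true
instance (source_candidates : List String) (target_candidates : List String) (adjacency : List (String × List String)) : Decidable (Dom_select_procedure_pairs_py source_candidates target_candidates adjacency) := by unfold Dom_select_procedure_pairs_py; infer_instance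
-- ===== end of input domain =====

-- ===== PORT A =====
-- B replaces A's full source×target product scans by per-source adjacency walks and a reverse index (objective: faster).
-- A-side helpers (one per Python local of _select_procedure_pairs)
def pvPairsA (source_candidates : List String) (target_candidates : List String) : List (String × String) :=
  (PySem.List.sorted source_candidates id).flatMap
    (fun s => (PySem.List.sorted target_candidates id).map (fun t => (s, t)))

def pvDirectA (source_candidates : List String) (target_candidates : List String) (adjacency : List (String × List String)) : List (String × String) :=
  (pvPairsA source_candidates target_candidates).filter
    (fun p => ((PySem.Dict.mk adjacency).getD p.1 []).contains p.2)

def pvLocalA (source_candidates : List String) (target_candidates : List String) : List (String × String) :=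
  (PySem.List.sorted (PySem.Set.inter source_candidates target_candidates) id).map (fun x => (x, x))

def pvReverseA (source_candidates : List String) (target_candidates : List String) (adjacency : List (String × List String)) : List (String × String) :=
  (pvPairsA source_candidates target_candidates).filter
    (fun p => ((PySem.Dict.mk adjacency).getD p.2 []).contains p.1)

def select_procedure_pairs_py (source_candidates : List String) (target_candidates : List String) (adjacency : List (String × List String)) : List (String × String) :=
  if source_candidates.length = 1 ∧ target_candidates.length = 1 then
    [(source_candidates.headD "", target_candidates.headD "")]
  else if pvPairsA source_candidates target_candidates = [] then []
  else if pvDirectA source_candidates target_candidates adjacency ≠ [] then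
    pvDirectA source_candidates target_candidates adjacency
  else if pvLocalA source_candidates target_candidates ≠ [] then
    pvLocalA source_candidates target_candidates
  else if pvReverseA source_candidates target_candidates adjacency ≠ [] then
    pvReverseA source_candidates target_candidates adjacency
  else []

-- ===== PORT B =====
-- B-side helpers (one per stage of Source B)
def pvDirectB (source_candidates : List String) (target_candidates : List String) (adjacency : List (String × List String)) : List (String × String) :=
  (PySem.List.sorted source_candidates id).flatMap (fun s =>
    ((PySem.List.sorted ((PySem.Dict.mk adjacency).getD s []) id).filter
      (fun t => (PySem.Set.ofList target_candidates).contains t)).map (fun t => (s, t)))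

def pvLocalB (source_candidates : List String) (target_candidates : List String) : List (String × String) :=
  ((PySem.List.sorted source_candidates id).filter
    (fun p => (PySem.Set.ofList target_candidates).contains p)).map (fun p => (p, p))

-- the reverse index rmap; the inner loop iterates a Python set whose element order
-- cannot affect the dict (each hit goes to a distinct key s), so the stored-list order is used
def pvRmapB (source_candidates : List String) (target_candidates : List String) (adjacency : List (String × List String)) : PySem.Dict String (List String) :=
  (PySem.List.sorted target_candidates id).foldl (fun d t =>
    ((PySem.Dict.mk adjacency).getD t []).foldl (fun d s =>
      if (PySem.Set.ofList source_candidates).contains s then d.modify s [] (· ++ [t]) else d) d)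
    PySem.Dict.empty

def pvReverseB (source_candidates : List String) (target_candidates : List String) (adjacency : List (String × List String)) : List (String × String) :=
  (PySem.List.sorted source_candidates id).flatMap (fun s =>
    ((pvRmapB source_candidates target_candidates adjacency).getD s []).map (fun t => (s, t)))

def select_procedure_pairs_py_alt (source_candidates : List String) (target_candidates : List String) (adjacency : List (String × List String)) : List (String × String) :=
  if source_candidates.length = 1 ∧ target_candidates.length = 1 then
    [(source_candidates.headD "", target_candidates.headD "")]
  else if pvDirectB source_candidates target_candidates adjacency ≠ [] then
    pvDirectB source_candidates target_candidates adjacency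
  else if pvLocalB source_candidates target_candidates ≠ [] then
    pvLocalB source_candidates target_candidates
  else
    pvReverseB source_candidates target_candidates adjacency

-- ===== PRECONDITION & SPEC =====
-- Pre_ only states that the arguments model the declared Python types set[str] / Mapping[str, set[str]]:
-- candidate lists and adjacency values are duplicate-free (a list with duplicates is not a set).
def Pre_select_procedure_pairs_py (source_candidates : List String) (target_candidates : List String) (adjacency : List (String × List String)) : Prop :=
  source_candidates.Nodup ∧ target_candidates.Nodup ∧ ∀ p ∈ adjacency, p.2.Nodup
instance (source_candidates : List String) (target_candidates : List String) (adjacency : List (String × List String)) : Decidable (Pre_select_procedure_pairs_py source_candidates target_candidates adjacency) := by unfold Pre_select_procedure_pairs_py; infer_instance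

def pvWitness_select_procedure_pairs_py : List String × List String × (List (String × List String)) :=
  (["a", "b"], ["b", "c"], [("a", ["c"])])

def Spec_select_procedure_pairs_py (source_candidates : List String) (target_candidates : List String) (adjacency : List (String × List String)) (out : List (String × String)) : Prop := out = select_procedure_pairs_py_alt source_candidates target_candidates adjacency
instance (source_candidates : List String) (target_candidates : List String) (adjacency : List (String × List String)) (out : List (String × String)) : Decidable (Spec_select_procedure_pairs_py source_candidates target_candidates adjacency out) := by unfold Spec_select_procedure_pairs_py; infer_instance

-- ===== CLAIM (what is proved, stated in full; the proofs are below) =====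
def Claim_equal_select_procedure_pairs_py : Prop := ∀ (source_candidates : List String) (target_candidates : List String) (adjacency : List (String × List String)), Dom_select_procedure_pairs_py source_candidates target_candidates adjacency → Pre_select_procedure_pairs_py source_candidates target_candidates adjacency → Spec_select_procedure_pairs_py source_candidates target_candidates adjacency (select_procedure_pairs_py source_candidates target_candidates adjacency)

-- ===== LEMMAS AND PROOFS =====

theorem pv_sorted_nodup (xs : List String) (h : xs.Nodup) : (PySem.List.sorted xs id).Nodup :=
  ((PySem.List.sorted_perm xs id false).nodup_iff).mpr h

theorem pv_mem_sorted (xs : List String) (x : String) : x ∈ PySem.List.sorted xs id ↔ x ∈ xs :=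
  (PySem.List.sorted_perm xs id false).mem_iff

theorem pv_sorted_pairwise_le (xs : List String) : (PySem.List.sorted xs id).Pairwise (· ≤ ·) := by
  have := PySem.List.sorted_pairwise xs id
  simpa using this

theorem adj_nodup (adjacency : List (String × List String)) (hA : ∀ p ∈ adjacency, p.2.Nodup) (k : String) :
    ((PySem.Dict.mk adjacency).getD k []).Nodup := by
  induction adjacency with
  | nil => simp [PySem.Dict.getD, PySem.Dict.get?]
  | cons hd tl ih =>
    rw [PySem.Dict.getD_eq_get?_getD, PySem.Dict.get?_mk_cons]
    split
    · exact hA hd (by simp)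
    · rw [← PySem.Dict.getD_eq_get?_getD]
      exact ih (fun p hp => hA p (by simp [hp]))

theorem per_src (target_candidates : List String) (adjacency : List (String × List String))
    (hT : target_candidates.Nodup) (hA : ∀ p ∈ adjacency, p.2.Nodup) (s : String) :
    (PySem.List.sorted target_candidates id).filter (fun t => ((PySem.Dict.mk adjacency).getD s []).contains t)
      = (PySem.List.sorted ((PySem.Dict.mk adjacency).getD s []) id).filter
          (fun t => (PySem.Set.ofList target_candidates).contains t) := by
  apply PySem.List.eq_of_perm_of_pairwise_le
  · apply (List.perm_ext_iff_of_nodup ?_ ?_).mpr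
    · intro a
      simp [List.mem_filter, PySem.Set.contains, PySem.Set.mem_ofList, List.contains_eq_mem]
      exact and_comm
    · exact (pv_sorted_nodup target_candidates hT).filter _
    · exact (pv_sorted_nodup _ (adj_nodup adjacency hA s)).filter _
  · exact (pv_sorted_pairwise_le target_candidates).filter _
  · exact (pv_sorted_pairwise_le _).filter _

theorem direct_eq (source_candidates target_candidates : List String) (adjacency : List (String × List String))
    (hT : target_candidates.Nodup) (hA : ∀ p ∈ adjacency, p.2.Nodup) :
    pvDirectA source_candidates target_candidates adjacency = pvDirectB source_candidates target_candidates adjacency := by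
  unfold pvDirectA pvDirectB pvPairsA
  rw [List.filter_flatMap]
  congr 1
  funext s
  rw [List.filter_map]
  simp only [Function.comp_def]
  rw [per_src target_candidates adjacency hT hA s]

theorem local_eq (source_candidates target_candidates : List String) (hS : source_candidates.Nodup) :
    pvLocalA source_candidates target_candidates = pvLocalB source_candidates target_candidates := by
  unfold pvLocalA pvLocalB
  congr 1
  apply PySem.List.eq_of_perm_of_pairwise_le
  · apply (List.perm_ext_iff_of_nodup ?_ ?_).mpr
    · intro a
      simp [PySem.Set.mem_inter, List.mem_filter, PySem.Set.contains, PySem.Set.mem_ofList]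
    · exact pv_sorted_nodup _ (PySem.Set.nodup_inter source_candidates target_candidates hS)
    · exact (pv_sorted_nodup source_candidates hS).filter _
  · exact pv_sorted_pairwise_le _
  · exact (pv_sorted_pairwise_le source_candidates).filter _

theorem flatMap_ite_singleton {α : Type} (l : List α) (p : α → Bool) :
    l.flatMap (fun x => if p x then [x] else []) = l.filter p := by
  induction l with
  | nil => rfl
  | cons a l ih => by_cases h : p a <;> simp [List.flatMap_cons, h, ih]

theorem rmap_flat (source_candidates target_candidates : List String) (adjacency : List (String × List String)) :
    pvRmapB source_candidates target_candidates adjacency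
    = (((PySem.List.sorted target_candidates id).flatMap (fun t =>
          (((PySem.Dict.mk adjacency).getD t []).filter
            (fun x => (PySem.Set.ofList source_candidates).contains x)).map
            (fun x => (x, t)))).foldl
        (fun d p => d.modify p.1 [] (· ++ [p.2])) PySem.Dict.empty) := by
  unfold pvRmapB
  rw [List.foldl_flatMap]
  apply PySem.List.foldl_congr_mem
  intro d t _
  rw [List.foldl_map, PySem.List.foldl_if_eq_foldl_filter]

theorem rmap_getD (source_candidates target_candidates : List String) (adjacency : List (String × List String))
    (hA : ∀ p ∈ adjacency, p.2.Nodup) (s : String) (hs : s ∈ source_candidates) :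
    (pvRmapB source_candidates target_candidates adjacency).getD s []
    = (PySem.List.sorted target_candidates id).filter
        (fun t => ((PySem.Dict.mk adjacency).getD t []).contains s) := by
  rw [rmap_flat, PySem.Dict.getD_foldl_modify_append]
  rw [List.filter_flatMap]
  simp only [List.filter_map, Function.comp_def, List.filter_filter, List.map_flatMap,
    List.map_map]
  rw [← flatMap_ite_singleton (PySem.List.sorted target_candidates id)
        (fun t => ((PySem.Dict.mk adjacency).getD t []).contains s)]
  simp only [PySem.Dict.getD_empty, List.nil_append]
  congr 1
  funext t
  by_cases hm : s ∈ (PySem.Dict.mk adjacency).getD t []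
  · have hc : ((PySem.Dict.mk adjacency).getD t []).contains s = true := by
      rw [List.contains_eq_mem]; exact decide_eq_true hm
    rw [if_pos hc]
    have h1 : List.filter (fun a => (a == s) && (PySem.Set.ofList source_candidates).contains a)
        ((PySem.Dict.mk adjacency).getD t [])
        = List.filter (fun a => a == s) ((PySem.Dict.mk adjacency).getD t []) := by
      apply List.filter_congr
      intro x _
      by_cases he : x = s
      · subst he; simp [PySem.Set.contains, PySem.Set.mem_ofList, hs]
      · simp [he]
    rw [h1, List.filter_beq, List.count_eq_one_of_mem (adj_nodup adjacency hA t) hm]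
    rfl
  · have hc : ((PySem.Dict.mk adjacency).getD t []).contains s = false := by
      rw [List.contains_eq_mem]; exact decide_eq_false hm
    simp only [hc, Bool.false_eq_true, if_false]
    rw [List.map_eq_nil_iff, List.filter_eq_nil_iff]
    intro a ha hcc
    simp at hcc
    exact hm (hcc.1 ▸ ha)

theorem reverse_eq (source_candidates target_candidates : List String) (adjacency : List (String × List String))
    (hA : ∀ p ∈ adjacency, p.2.Nodup) :
    pvReverseA source_candidates target_candidates adjacency = pvReverseB source_candidates target_candidates adjacency := by
  unfold pvReverseA pvReverseB pvPairsA
  rw [List.filter_flatMap]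
  apply List.flatMap_congr
  intro s hsm
  have hs : s ∈ source_candidates := (pv_mem_sorted source_candidates s).mp hsm
  rw [List.filter_map, rmap_getD source_candidates target_candidates adjacency hA s hs]
  rfl

theorem pairs_nil (source_candidates target_candidates : List String)
    (h : pvPairsA source_candidates target_candidates = []) :
    source_candidates = [] ∨ target_candidates = [] := by
  unfold pvPairsA at h
  rw [List.flatMap_eq_nil_iff] at h
  by_cases hs : source_candidates = []
  · exact Or.inl hs
  · right
    rw [← PySem.List.sorted_eq_nil_iff (key := id) (rev := false)] at hs ⊢
    obtain ⟨s, hsm⟩ := List.exists_mem_of_ne_nil _ hs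
    have := h _ hsm
    rw [List.map_eq_nil_iff] at this
    exact this

theorem local_nil (source_candidates target_candidates : List String)
    (h : source_candidates = [] ∨ target_candidates = []) :
    pvLocalA source_candidates target_candidates = [] := by
  unfold pvLocalA
  rw [List.map_eq_nil_iff, PySem.List.sorted_eq_nil_iff, List.eq_nil_iff_forall_not_mem]
  intro x hx
  rw [PySem.Set.mem_inter] at hx
  rcases h with h | h <;> simp [h] at hx

-- ===== VERDICT (by name: the statement is the Claim_ definition above) =====
theorem select_procedure_pairs_py_spec : Claim_equal_select_procedure_pairs_py := by
  intro S T adjacency _hdom hpre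
  obtain ⟨hS, hT, hA⟩ := hpre
  unfold Spec_select_procedure_pairs_py select_procedure_pairs_py select_procedure_pairs_py_alt
  have hdir := direct_eq S T adjacency hT hA
  have hloc := local_eq S T hS
  have hrev := reverse_eq S T adjacency hA
  by_cases h1 : S.length = 1 ∧ T.length = 1
  · simp [h1]
  · simp only [if_neg h1]
    by_cases hp : pvPairsA S T = []
    · have hd0 : pvDirectA S T adjacency = [] := by
        unfold pvDirectA; rw [hp]; rfl
      have hr0 : pvReverseA S T adjacency = [] := by
        unfold pvReverseA; rw [hp]; rfl
      have hl0 : pvLocalA S T = [] := local_nil S T (pairs_nil S T hp)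
      rw [if_pos hp, ← hdir, hd0, ← hloc, hl0, ← hrev, hr0]
      simp
    · rw [if_neg hp, ← hdir, ← hloc, ← hrev]
      by_cases hd : pvDirectA S T adjacency = []
      · by_cases hl : pvLocalA S T = []
        · by_cases hr : pvReverseA S T adjacency = []
          · simp [hd, hl, hr]
          · simp [hd, hl, hr]
        · simp [hd, hl]
      · simp [hd]
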